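-- pv_equiv track=rewrite | github.com/cyrilgabriele/ParrotLLM | src/data/preprocess.py | _max_ngram_repeats
-- ===== SOURCE A (Python) =====
-- NGRAM_SIZE = 10
--
-- def _max_ngram_repeats(text: str, n: int = NGRAM_SIZE) -> int:
--     """Maximum repetition count of any word-level *n*-gram."""
--     words = text.split()
--     if len(words) < n:
--         return 0
--     counts: dict[tuple[str, ...], int] = {}
--     for i in range(len(words) - n + 1):
--         gram = tuple(words[i : i + n])
--         counts[gram] = counts.get(gram, 0) + 1
--     return max(counts.values()) if counts else 0
-- ===== SOURCE B (Python) =====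
-- NGRAM_SIZE = 10
--
-- def _max_ngram_repeats(text: str, n: int = NGRAM_SIZE) -> int:
--     """Maximum repetition count of any word-level *n*-gram, by sorting the
--     n-grams and measuring the longest run of consecutive equal ones."""
--     words = text.split()
--     if len(words) < n:
--         return 0
--     grams = sorted(tuple(words[i:i + n]) for i in range(len(words) - n + 1))
--     best = 0
--     run = 0
--     prev = None
--     for g in grams:
--         if g == prev:
--             run += 1
--         else:
--             run = 1
--             prev = g
--         if run > best:
--             best = run
--     return best
-- ===== Notes on version B (the rewrite author's own statement) =====
-- stated objective: alternative
-- what changed: A counts n-gram frequencies in a hash table and takes the max of its values; B sorts the list of n-grams and returns the length of the longest run of consecutive equal n-grams in a single scan.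
import Mathlib
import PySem

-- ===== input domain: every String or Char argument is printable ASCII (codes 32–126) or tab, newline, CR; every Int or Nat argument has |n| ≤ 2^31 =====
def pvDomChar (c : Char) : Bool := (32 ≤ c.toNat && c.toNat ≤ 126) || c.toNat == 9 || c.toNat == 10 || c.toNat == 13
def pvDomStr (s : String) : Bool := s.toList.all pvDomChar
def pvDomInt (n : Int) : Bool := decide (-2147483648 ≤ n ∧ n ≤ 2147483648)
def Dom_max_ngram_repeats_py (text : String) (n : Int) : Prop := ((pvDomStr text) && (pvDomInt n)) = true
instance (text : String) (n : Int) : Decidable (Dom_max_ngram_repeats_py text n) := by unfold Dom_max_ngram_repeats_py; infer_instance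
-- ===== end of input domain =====

-- B replaces A's hash-table n-gram frequency count by sort-then-scan: it sorts the list of
-- n-grams and returns the longest run of consecutive equal ones (objective: alternative).

-- ===== PORT A =====
def max_ngram_repeats_py (text : String) (n : Int) : Int :=
  let words := PySem.Str.split₀ text
  if (words.length : Int) < n then 0
  else
    let counts : PySem.Dict (List String) Int :=
      (PySem.List.pyRange 0 ((words.length : Int) - n + 1) 1).foldl
        (fun d i =>
          let gram := PySem.List.slice words (some i) (some (i + n))
          d.insert gram (d.getD gram 0 + 1))
        PySem.Dict.empty
    if counts.size = 0 then 0
    else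
      match PySem.List.max? counts.values (fun v => v) with
      | some m => m
      | none => 0

-- ===== PORT B =====
-- the body of Source B's for-loop over the sorted n-gram list (state: best, run, prev)
def pvStep {κ : Type} [BEq κ] (st : Int × Int × Option κ) (g : κ) : Int × Int × Option κ :=
  let rp : Int × Option κ := if some g == st.2.2 then (st.2.1 + 1, st.2.2) else (1, some g)
  (if rp.1 > st.1 then rp.1 else st.1, rp.1, rp.2)

def max_ngram_repeats_py_alt (text : String) (n : Int) : Int :=
  let words := PySem.Str.split₀ text
  if (words.length : Int) < n then 0
  else
    let grams :=
      ((PySem.List.pyRange 0 ((words.length : Int) - n + 1) 1).map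
        (fun i => PySem.List.slice words (some i) (some (i + n)))).mergeSort
        (fun g h => decide (g ≤ h))
    (grams.foldl pvStep ((0 : Int), (0 : Int), (none : Option (List String)))).1

-- ===== PRECONDITION & SPEC =====
def Spec_max_ngram_repeats_py (text : String) (n : Int) (out : Int) : Prop := out = max_ngram_repeats_py_alt text n
instance (text : String) (n : Int) (out : Int) : Decidable (Spec_max_ngram_repeats_py text n out) := by unfold Spec_max_ngram_repeats_py; infer_instance

-- ===== CLAIM (what is proved, stated in full; the proofs are below) =====
def Claim_equal_max_ngram_repeats_py : Prop := ∀ (text : String) (n : Int), Dom_max_ngram_repeats_py text n → Spec_max_ngram_repeats_py text n (max_ngram_repeats_py text n)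

-- ===== LEMMAS AND PROOFS =====

-- the scan result is bounded by any M ≥ 1 that bounds every count in the remaining list
theorem pvScan_le {κ : Type} [BEq κ] [LawfulBEq κ] (s : List κ) :
    ∀ (M best run : Int) (p : κ), 1 ≤ M → best ≤ M → run + (s.count p : Int) ≤ M →
    (∀ x : κ, ((s.count x : Int)) ≤ M) →
    (s.foldl pvStep (best, run, some p)).1 ≤ M := by
  induction s with
  | nil => intro M best run p _ hb _ _; simpa [List.foldl] using hb
  | cons g t ih =>
    intro M best run p hM hb hr hall
    rw [List.foldl_cons]
    by_cases hg : g = p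
    · subst hg
      have hcnt : ((g :: t).count g : Int) = (t.count g : Int) + 1 := by
        rw [List.count_cons_self]; push_cast; ring
      have hstep : pvStep (best, run, some g) g
          = ((if run + 1 > best then run + 1 else best), run + 1, some g) := by
        simp [pvStep]
      rw [hstep]
      apply ih M _ (run + 1) g
      · exact hM
      · split <;> omega
      · omega
      · intro x
        have hx := hall x
        have : (t.count x : Int) ≤ ((g :: t).count x : Int) := by
          rw [List.count_cons]; push_cast; split <;> omega
        omega
    · have hstep : pvStep (best, run, some p) g
          = ((if 1 > best then 1 else best), 1, some g) := by
        simp [pvStep, hg]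
      rw [hstep]
      have hcg : ((g :: t).count g : Int) = (t.count g : Int) + 1 := by
        rw [List.count_cons_self]; push_cast; ring
      apply ih M _ 1 g
      · exact hM
      · split <;> omega
      · have := hall g; omega
      · intro x
        have hx := hall x
        have : (t.count x : Int) ≤ ((g :: t).count x : Int) := by
          rw [List.count_cons]; push_cast; split <;> omega
        omega

-- on a sorted remainder the scan reaches every count (p = element whose run is open)
theorem pvScan_ge {κ : Type} [BEq κ] [LawfulBEq κ] [LinearOrder κ] (s : List κ) :
    s.Pairwise (· ≤ ·) → ∀ (best run : Int) (p : κ), (∀ x ∈ s, p ≤ x) → 1 ≤ run → run ≤ best →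
    best ≤ (s.foldl pvStep (best, run, some p)).1 ∧
    run + (s.count p : Int) ≤ (s.foldl pvStep (best, run, some p)).1 ∧
    ∀ x ∈ s, (s.count x : Int) ≤ (s.foldl pvStep (best, run, some p)).1 := by
  induction s with
  | nil =>
    intro _ best run p _ _ hrb
    refine ⟨le_refl _, by simpa [List.foldl] using hrb, by simp⟩
  | cons g t ih =>
    intro hpair best run p hple h1r hrb
    have hpt : t.Pairwise (· ≤ ·) := (List.pairwise_cons.mp hpair).2
    have hgle : ∀ x ∈ t, g ≤ x := (List.pairwise_cons.mp hpair).1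
    rw [List.foldl_cons]
    by_cases hg : g = p
    · subst hg
      have hstep : pvStep (best, run, some g) g
          = ((if run + 1 > best then run + 1 else best), run + 1, some g) := by
        simp [pvStep]
      rw [hstep]
      obtain ⟨A1, A2, A3⟩ := ih hpt (if run + 1 > best then run + 1 else best) (run + 1) g
        hgle (by omega) (by split <;> omega)
      refine ⟨le_trans (by split <;> omega) A1, ?_, ?_⟩
      · rw [List.count_cons_self]; push_cast; omega
      · intro x hx
        rcases List.mem_cons.mp hx with h | h
        · subst h; rw [List.count_cons_self]; push_cast; omega
        · by_cases hxg : x = g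
          · subst hxg; rw [List.count_cons_self]; push_cast; omega
          · rw [List.count_cons_of_ne (by simpa using Ne.symm hxg)]
            exact A3 x h
    · have hstep : pvStep (best, run, some p) g
          = ((if 1 > best then 1 else best), 1, some g) := by
        simp [pvStep, hg]
      rw [hstep]
      obtain ⟨A1, A2, A3⟩ := ih hpt (if 1 > best then 1 else best) 1 g
        hgle le_rfl (by split <;> omega)
      have hbestle : best ≤ (t.foldl pvStep ((if 1 > best then 1 else best), 1, some g)).1 :=
        le_trans (by split <;> omega) A1
      have hpg : p < g := lt_of_le_of_ne (hple g (List.mem_cons_self)) (fun h => hg h.symm)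
      have hpnot : p ∉ g :: t := by
        intro hmem
        rcases List.mem_cons.mp hmem with h | h
        · exact absurd h.symm (ne_of_lt hpg).symm
        · exact absurd rfl (ne_of_lt (lt_of_lt_of_le hpg (hgle p h)))
      refine ⟨hbestle, ?_, ?_⟩
      · rw [List.count_eq_zero.mpr hpnot]; push_cast; omega
      · intro x hx
        rcases List.mem_cons.mp hx with h | h
        · subst h; rw [List.count_cons_self]; push_cast; omega
        · by_cases hxg : x = g
          · subst hxg; rw [List.count_cons_self]; push_cast; omega
          · rw [List.count_cons_of_ne (by simpa using Ne.symm hxg)]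
            exact A3 x h

-- the two else-branches agree
theorem pvBranch (ws : List String) (n : Int) :
    (if (List.foldl
        (fun d i =>
          d.insert (PySem.List.slice ws (some i) (some (i + n)))
            ((d.getD (PySem.List.slice ws (some i) (some (i + n))) 0) + 1))
        (PySem.Dict.empty : PySem.Dict (List String) Int) (PySem.List.pyRange 0 ((ws.length : Int) - n + 1) 1)).size = 0 then 0
     else
       match PySem.List.max? (List.foldl
        (fun d i =>
          d.insert (PySem.List.slice ws (some i) (some (i + n)))
            ((d.getD (PySem.List.slice ws (some i) (some (i + n))) 0) + 1))
        (PySem.Dict.empty : PySem.Dict (List String) Int) (PySem.List.pyRange 0 ((ws.length : Int) - n + 1) 1)).values (fun v => v) with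
       | some m => m
       | none => (0 : Int)) =
    ((((PySem.List.pyRange 0 ((ws.length : Int) - n + 1) 1).map
        (fun i => PySem.List.slice ws (some i) (some (i + n)))).mergeSort
        (fun g h => decide (g ≤ h))).foldl pvStep ((0 : Int), (0 : Int), (none : Option (List String)))).1 := by
  -- name the n-gram list
  set grams : List (List String) :=
    (PySem.List.pyRange 0 ((ws.length : Int) - n + 1) 1).map
      (fun i => PySem.List.slice ws (some i) (some (i + n))) with hgrams
  -- A's dict is the counter of grams
  have hcounter :
      (PySem.List.pyRange 0 ((ws.length : Int) - n + 1) 1).foldl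
        (fun d i =>
          d.insert (PySem.List.slice ws (some i) (some (i + n)))
            ((d.getD (PySem.List.slice ws (some i) (some (i + n))) 0) + 1))
        (PySem.Dict.empty : PySem.Dict (List String) Int)
      = PySem.Dict.counter grams := by
    rw [hgrams, ← PySem.Dict.foldl_insert_getD_add_one_eq_counter, List.foldl_map]
  clear_value grams
  simp only [hcounter]
  -- values of the counter
  have hvals : (PySem.Dict.counter grams).values
      = (PySem.Set.ofList grams).map (fun k => (grams.count k : Int)) := by
    show (PySem.Dict.counter grams).items.map Prod.snd = _
    rw [PySem.Dict.items_counter, List.map_map]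
    rfl
  have hsize : (PySem.Dict.counter grams).size = (PySem.Set.ofList grams).length := by
    show (PySem.Dict.counter grams).items.length = _
    rw [PySem.Dict.items_counter, List.length_map]
  by_cases hnil : grams = []
  · subst hnil
    rw [List.mergeSort_nil]
    simp [hsize, PySem.Set.ofList_nil]
  · -- nonempty case
    have hsne : grams.mergeSort (fun g h => decide (g ≤ h)) ≠ [] := by
      intro h
      have hp := List.mergeSort_perm grams (fun g h => decide (g ≤ h))
      rw [h] at hp
      exact hnil hp.symm.eq_nil
    obtain ⟨g0, t, hst⟩ := List.exists_cons_of_ne_nil hsne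
    have hperm : (grams.mergeSort (fun g h => decide (g ≤ h))).Perm grams :=
      List.mergeSort_perm grams _
    have hcnt : ∀ x : List String,
        (grams.mergeSort (fun g h => decide (g ≤ h))).count x = grams.count x :=
      fun x => hperm.count_eq x
    have hmemS : ∀ x : List String, x ∈ grams.mergeSort (fun g h => decide (g ≤ h)) ↔ x ∈ grams :=
      fun x => hperm.mem_iff
    -- the distinct values list is nonempty
    have hvne : (PySem.Set.ofList grams).map (fun k => (grams.count k : Int)) ≠ [] := by
      intro h
      rcases List.exists_cons_of_ne_nil hnil with ⟨a, l, ha⟩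
      have : a ∈ PySem.Set.ofList grams := (PySem.Set.mem_ofList _ _).mpr (by rw [ha]; exact List.mem_cons_self)
      rw [List.map_eq_nil_iff.mp h] at this
      exact absurd this (List.not_mem_nil)
    obtain ⟨v, vt, hv⟩ := List.exists_cons_of_ne_nil hvne
    -- A's branch: size ≠ 0
    have hsz : ¬ (PySem.Dict.counter grams).size = 0 := by
      rw [hsize]
      intro h
      have h2 := List.length_eq_zero_iff.mp h
      rw [h2] at hvne
      exact hvne rfl
    rw [if_neg hsz, hvals, hv, PySem.List.max?_id_cons]
    -- A's value
    set Amax : Int := vt.foldl max v with hAmax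
    -- facts about Amax
    have hAmem : Amax ∈ v :: vt := by
      rcases PySem.List.foldl_max_mem vt v with h | h
      · rw [hAmax, h]; exact List.mem_cons_self
      · exact List.mem_cons_of_mem _ h
    have hAub : ∀ y ∈ v :: vt, y ≤ Amax := by
      intro y hy
      rcases List.mem_cons.mp hy with h | h
      · rw [h]; exact (PySem.List.le_foldl_max vt v).1
      · exact (PySem.List.le_foldl_max vt v).2 y h
    have hvmem : ∀ y, y ∈ v :: vt ↔ ∃ k ∈ grams, y = (grams.count k : Int) := by
      intro y
      rw [← hv]
      constructor
      · intro hy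
        rcases List.mem_map.mp hy with ⟨k, hk, hky⟩
        exact ⟨k, (PySem.Set.mem_ofList _ _).mp hk, hky.symm⟩
      · rintro ⟨k, hk, rfl⟩
        exact List.mem_map.mpr ⟨k, (PySem.Set.mem_ofList _ _).mpr hk, rfl⟩
    obtain ⟨k0, hk0mem, hk0⟩ := (hvmem Amax).mp hAmem
    have hA1 : 1 ≤ Amax := by
      rw [hk0]
      have : 0 < grams.count k0 := List.count_pos_iff.mpr hk0mem
      omega
    have hcle : ∀ x : List String, (grams.count x : Int) ≤ Amax := by
      intro x
      by_cases hx : x ∈ grams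
      · exact hAub _ ((hvmem _).mpr ⟨x, hx, rfl⟩)
      · rw [List.count_eq_zero.mpr hx]; omega
    -- B's scan
    rw [hst, List.foldl_cons]
    have hst1 : pvStep ((0 : Int), (0 : Int), (none : Option (List String))) g0
        = ((1 : Int), (1 : Int), some g0) := by simp [pvStep]
    rw [hst1]
    have hg0S : g0 ∈ grams.mergeSort (fun g h => decide (g ≤ h)) := by
      rw [hst]; exact List.mem_cons_self
    have hg0 : g0 ∈ grams := (hmemS g0).mp hg0S
    have hcntg0 : (t.count g0 : Int) + 1 = (grams.count g0 : Int) := by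
      rw [← hcnt g0, hst, List.count_cons_self]; push_cast; ring
    have htcnt : ∀ x : List String, (t.count x : Int) ≤ (grams.count x : Int) := by
      intro x
      rw [← hcnt x, hst, List.count_cons]
      push_cast
      split <;> omega
    have hpair : (grams.mergeSort (fun g h => decide (g ≤ h))).Pairwise (· ≤ ·) :=
      List.pairwise_mergeSort' (· ≤ ·) grams
    rw [hst] at hpair
    have hpt : t.Pairwise (· ≤ ·) := (List.pairwise_cons.mp hpair).2
    have hgle : ∀ x ∈ t, g0 ≤ x := (List.pairwise_cons.mp hpair).1
    -- upper bound: scan ≤ Amax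
    have hub : (t.foldl pvStep ((1 : Int), (1 : Int), some g0)).1 ≤ Amax := by
      apply pvScan_le t Amax 1 1 g0 hA1 hA1
      · have := hcle g0; omega
      · intro x; have := htcnt x; have := hcle x; omega
    -- lower bound: Amax ≤ scan
    obtain ⟨B1, B2, B3⟩ := pvScan_ge t hpt 1 1 g0 hgle le_rfl le_rfl
    have hlb : Amax ≤ (t.foldl pvStep ((1 : Int), (1 : Int), some g0)).1 := by
      rw [hk0]
      have hk0S : k0 ∈ g0 :: t := by rw [← hst]; exact (hmemS k0).mpr hk0mem
      by_cases hkg : k0 = g0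
      · subst hkg; omega
      · have hkt : k0 ∈ t := by
          rcases List.mem_cons.mp hk0S with h | h
          · exact absurd h hkg
          · exact h
        have : (t.count k0 : Int) = (grams.count k0 : Int) := by
          rw [← hcnt k0, hst, List.count_cons_of_ne (fun h => hkg h.symm)]
        have := B3 k0 hkt
        omega
    show Amax = (List.foldl pvStep ((1 : Int), (1 : Int), some g0) t).1
    omega

-- ===== VERDICT (by name: the statement is the Claim_ definition above) =====
theorem max_ngram_repeats_py_spec : Claim_equal_max_ngram_repeats_py := by
  intro text n _
  unfold Spec_max_ngram_repeats_py max_ngram_repeats_py max_ngram_repeats_py_alt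
  by_cases hlt : ((PySem.Str.split₀ text).length : Int) < n
  · simp only [if_pos hlt]
  · simp only [if_neg hlt]
    exact pvBranch (PySem.Str.split₀ text) n
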